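-- pv_equiv track=rewrite | github.com/mellery/project_euler | problem37.py | can_be_truncatable
-- ===== SOURCE A (Python) =====
-- def can_be_truncatable(n):
--     """Quick filter: truncatable primes can only contain digits 1,2,3,5,7,9"""
--     s = str(n)
--     # First digit can be 2,3,5,7 (must be prime)
--     # Middle digits can be 1,3,7,9 (even digits and 5 would create composite truncations)
--     # Last digit can be 3,7 (must be prime and odd, excluding 5)
--
--     if len(s) == 1:
--         return False
--
--     # First digit must be prime
--     if s[0] not in '2357':
--         return False
--
--     # Last digit must be 3 or 7 (prime and not 2 or 5)
--     if s[-1] not in '37':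
--         return False
--
--     # Middle digits cannot be 0,2,4,5,6,8 as they would create composites
--     for i in range(1, len(s)-1):
--         if s[i] not in '1379':
--             return False
--
--     return True
-- ===== SOURCE B (Python) =====
-- def can_be_truncatable(n):
--     """Quick filter: truncatable primes can only contain digits 1,2,3,5,7,9"""
--     # One-pass DFA for the pattern [2357][1379]*[37] run over str(n):
--     # no length test, no first/last indexing -- acceptance falls out of the run.
--     DEAD, START, FIRST, MID, ACCEPT = -1, 0, 1, 2, 3
--     state = START
--     for c in str(n):
--         if state == START:
--             state = FIRST if c in '2357' else DEAD
--         elif state == DEAD: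
--             break
--         else:  # FIRST, MID and ACCEPT share the same transitions
--             state = ACCEPT if c in '37' else (MID if c in '19' else DEAD)
--     return state == ACCEPT
-- ===== Notes on version B (the rewrite author's own statement) =====
-- stated objective: alternative
-- what changed: B replaces A's staged positional guards (length check, first char, last char, index loop over the middle) by a single-pass finite-automaton run: a state accumulator driven over str(n) by the DFA of the pattern [2357][1379]*[37], returning whether the run ends in the accepting state.
import Mathlib
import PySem

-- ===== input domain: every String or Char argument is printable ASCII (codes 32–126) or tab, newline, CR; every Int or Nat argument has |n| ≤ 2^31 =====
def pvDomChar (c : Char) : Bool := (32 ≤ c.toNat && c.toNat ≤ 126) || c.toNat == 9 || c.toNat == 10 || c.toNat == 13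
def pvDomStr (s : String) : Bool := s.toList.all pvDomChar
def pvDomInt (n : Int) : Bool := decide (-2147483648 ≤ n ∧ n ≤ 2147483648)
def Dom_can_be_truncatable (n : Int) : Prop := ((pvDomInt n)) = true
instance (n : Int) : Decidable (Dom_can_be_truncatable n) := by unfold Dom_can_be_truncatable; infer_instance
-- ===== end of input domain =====

-- B replaces A's positional guards on str(n) by a one-pass DFA run for [2357][1379]*[37]; same result.

-- ===== PORT A =====
-- s[0] / s[-1] / s[i] are always in range here (str(n) is nonempty, and length ≥ 2 past the
-- first guard), so pyGetD with a dummy default is exact.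
def can_be_truncatable (n : Int) : Bool :=
  let s := PySem.Int.toChars n
  if PySem.List.len s = 1 then false
  else if !(decide (PySem.List.pyGetD s 0 ' ' ∈ (['2','3','5','7'] : List Char))) then false
  else if !(decide (PySem.List.pyGetD s (-1) ' ' ∈ (['3','7'] : List Char))) then false
  else (PySem.List.pyRange 1 (PySem.List.len s - 1) 1).all
         (fun i => decide (PySem.List.pyGetD s i ' ' ∈ (['1','3','7','9'] : List Char)))

-- ===== PORT B =====
-- the `for c in str(n)` loop of Source B: states DEAD=-1, START=0, FIRST=1, MID=2, ACCEPT=3;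
-- `break` on DEAD is the early return of -1.
def pvDfaRun : Int → List Char → Int
  | state, [] => state
  | state, c :: cs =>
    if state = 0 then
      pvDfaRun (if c ∈ (['2','3','5','7'] : List Char) then 1 else -1) cs
    else if state = -1 then -1
    else
      pvDfaRun (if c ∈ (['3','7'] : List Char) then 3
                else if c ∈ (['1','9'] : List Char) then 2 else -1) cs

def can_be_truncatable_alt (n : Int) : Bool :=
  decide (pvDfaRun 0 (PySem.Int.toChars n) = 3)

-- ===== PRECONDITION & SPEC =====
def Spec_can_be_truncatable (n : Int) (out : Bool) : Prop := out = can_be_truncatable_alt n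
instance (n : Int) (out : Bool) : Decidable (Spec_can_be_truncatable n out) := by unfold Spec_can_be_truncatable; infer_instance

-- ===== CLAIM (what is proved, stated in full; the proofs are below) =====
def Claim_equal_can_be_truncatable : Prop := ∀ (n : Int), Dom_can_be_truncatable n → Spec_can_be_truncatable n (can_be_truncatable n)

-- ===== LEMMAS AND PROOFS =====

lemma pvRun_dead (cs : List Char) : pvDfaRun (-1) cs = -1 := by
  cases cs <;> simp [pvDfaRun]

-- a live run over ms ++ [cl] accepts iff every ms-char is a middle digit and cl is a final digit
lemma pvRun_snoc (cl : Char) : ∀ (ms : List Char) (s : Int), (s = 1 ∨ s = 2 ∨ s = 3) →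
    decide (pvDfaRun s (ms ++ [cl]) = 3)
      = ((ms.all (fun c => decide (c ∈ (['1','3','7','9'] : List Char))))
          && decide (cl ∈ (['3','7'] : List Char))) := by
  intro ms
  induction ms with
  | nil =>
    intro s hs
    have h0 : ¬ s = 0 := by rcases hs with h|h|h <;> omega
    have h1 : ¬ s = -1 := by rcases hs with h|h|h <;> omega
    simp only [List.nil_append, pvDfaRun, h0, h1, if_false]
    by_cases hc : cl ∈ (['3','7'] : List Char)
    · simp [hc]
    · by_cases hc2 : cl ∈ (['1','9'] : List Char) <;> simp [hc, hc2]
  | cons m ms ih =>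
    intro s hs
    have h0 : ¬ s = 0 := by rcases hs with h|h|h <;> omega
    have h1 : ¬ s = -1 := by rcases hs with h|h|h <;> omega
    simp only [List.cons_append, pvDfaRun, if_neg h0, if_neg h1]
    by_cases hm : m ∈ (['3','7'] : List Char)
    · rw [if_pos hm, ih 3 (by omega)]
      have hd : decide (m ∈ (['1','3','7','9'] : List Char)) = true := by
        simp only [List.mem_cons, List.not_mem_nil] at hm ⊢; simp; tauto
      simp only [List.all_cons, hd, Bool.true_and]
    · rw [if_neg hm]
      by_cases hm2 : m ∈ (['1','9'] : List Char)
      · rw [if_pos hm2, ih 2 (by omega)]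
        have hd : decide (m ∈ (['1','3','7','9'] : List Char)) = true := by
          simp only [List.mem_cons, List.not_mem_nil] at hm2 ⊢; simp; tauto
        simp only [List.all_cons, hd, Bool.true_and]
      · rw [if_neg hm2, pvRun_dead]
        have hd : decide (m ∈ (['1','3','7','9'] : List Char)) = false := by
          simp only [List.mem_cons, List.not_mem_nil] at hm hm2 ⊢; simp; tauto
        simp only [List.all_cons, hd, Bool.false_and]
        decide

-- A's middle-digit loop over indices equals a sublist scan.
lemma pvLoop_eq : ∀ (k a : Nat) (s : List Char), a + k ≤ s.length →
    ((PySem.List.pyRange (a : Int) ((a + k : Nat) : Int) 1).all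
        (fun i => decide (PySem.List.pyGetD s i ' ' ∈ (['1','3','7','9'] : List Char))))
      = ((s.drop a).take k).all (fun c => decide (c ∈ (['1','3','7','9'] : List Char))) := by
  intro k
  induction k with
  | zero =>
    intro a s _
    have : ¬ ((a : Int) < ((a + 0 : Nat) : Int)) := by omega
    simp [PySem.List.pyRange]
  | succ k ih =>
    intro a s hs
    have hcons : PySem.List.pyRange (a : Int) ((a + (k + 1) : Nat) : Int) 1
        = (a : Int) :: PySem.List.pyRange ((a : Int) + 1) ((a + (k + 1) : Nat) : Int) 1 := by
      exact PySem.List.pyRange_one_cons (by omega)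
    have ha : a < s.length := by omega
    have hdrop : s.drop a = s[a] :: s.drop (a + 1) := List.drop_eq_getElem_cons ha
    have hcast : ((a : Int) + 1) = ((a + 1 : Nat) : Int) := by omega
    have hstop : ((a + (k + 1) : Nat) : Int) = (((a + 1) + k : Nat) : Int) := by omega
    rw [hcons, List.all_cons, hcast, hstop, ih (a + 1) s (by omega), hdrop, List.take_succ_cons,
      List.all_cons]
    simp [PySem.List.pyGetD_natCast, List.getD_eq_getElem?_getD, ha]

-- the two programs agree on ANY character list in place of str(n)
lemma pvMain (s : List Char) :
    (if PySem.List.len s = 1 then false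
     else if !(decide (PySem.List.pyGetD s 0 ' ' ∈ (['2','3','5','7'] : List Char))) then false
     else if !(decide (PySem.List.pyGetD s (-1) ' ' ∈ (['3','7'] : List Char))) then false
     else (PySem.List.pyRange 1 (PySem.List.len s - 1) 1).all
            (fun i => decide (PySem.List.pyGetD s i ' ' ∈ (['1','3','7','9'] : List Char))))
    = decide (pvDfaRun 0 s = 3) := by
  match s with
  | [] =>
    simp [PySem.List.len, pvDfaRun, PySem.List.pyGetD, PySem.List.pyGet?, PySem.List.pyIdx?]
  | [c] =>
    rw [if_pos (by simp [PySem.List.len])]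
    by_cases hc : c ∈ (['2','3','5','7'] : List Char) <;>
      simp [pvDfaRun, hc]
  | c0 :: c1 :: cs =>
    obtain ⟨ms, cl, hms⟩ : ∃ ms cl, (c1 :: cs) = ms ++ [cl] := by
      refine ⟨(c1 :: cs).dropLast, (c1 :: cs).getLast (by simp), ?_⟩
      exact (List.dropLast_append_getLast (by simp)).symm
    rw [show c0 :: c1 :: cs = c0 :: (ms ++ [cl]) by rw [← hms]]
    have hlen : (c0 :: (ms ++ [cl])).length = ms.length + 2 := by simp
    rw [if_neg (by simp [PySem.List.len, hlen]; omega)]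
    have hget0 : PySem.List.pyGetD (c0 :: (ms ++ [cl])) 0 ' ' = c0 := by
      rw [PySem.List.pyGetD_ofNat']; simp
    have hgetLast : PySem.List.pyGetD (c0 :: (ms ++ [cl])) (-1) ' ' = cl := by
      simp [PySem.List.pyGetD, PySem.List.pyGet?, PySem.List.pyIdx?]
    rw [hget0, hgetLast]
    by_cases h0 : c0 ∈ (['2','3','5','7'] : List Char)
    · rw [if_neg (by simp [h0])]
      have hB : pvDfaRun 0 (c0 :: (ms ++ [cl])) = pvDfaRun 1 (ms ++ [cl]) := by
        simp [pvDfaRun, h0]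
      rw [hB]
      have hloop : ((PySem.List.pyRange 1 (PySem.List.len (c0 :: (ms ++ [cl])) - 1) 1).all
            (fun i => decide (PySem.List.pyGetD (c0 :: (ms ++ [cl])) i ' '
                ∈ (['1','3','7','9'] : List Char))))
          = ms.all (fun c => decide (c ∈ (['1','3','7','9'] : List Char))) := by
        have hcast : PySem.List.len (c0 :: (ms ++ [cl])) - 1 = ((1 + ms.length : Nat) : Int) := by
          simp [PySem.List.len, hlen]; omega
        have hpre : (1 : Nat) + ms.length ≤ (c0 :: (ms ++ [cl])).length := by
          simp [hlen]; omega
        have h' := pvLoop_eq ms.length 1 (c0 :: (ms ++ [cl])) hpre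
        push_cast at h'
        rw [hcast]
        push_cast
        rw [h']
        simp [List.take_left']
      rw [hloop, pvRun_snoc cl ms 1 (by omega)]
      by_cases hL : cl ∈ (['3','7'] : List Char) <;> simp [hL]
    · rw [if_pos (by simp [h0])]
      have hB : pvDfaRun 0 (c0 :: (ms ++ [cl])) = pvDfaRun (-1) (ms ++ [cl]) := by
        simp [pvDfaRun, h0]
      rw [hB, pvRun_dead]
      simp

-- ===== VERDICT (by name: the statement is the Claim_ definition above) =====
theorem can_be_truncatable_spec : Claim_equal_can_be_truncatable := by
  intro n _
  unfold Spec_can_be_truncatable can_be_truncatable can_be_truncatable_alt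
  exact pvMain (PySem.Int.toChars n)
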